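-- pv_equiv track=rewrite | github.com/zeunala/ProblemSolving | BOJ/2021.07/G5_16234.py | checkArrSame
-- ===== SOURCE A (Python) =====
-- def checkArrSame(A, newA, n): # n*n크기의 A, newA 배열이 같은지 체크(다른 경우 A를 newA로 갱신한다.)
--     result = True
--     for i in range(n):
--         for j in range(n):
--             if(A[i][j]!=newA[i][j]):
--                 result = False
--                 A[i][j]=newA[i][j]
--
--     return result
-- ===== SOURCE B (Python) =====
-- def checkArrSame(A, newA, n):
--     # Row-level re-implementation: compare whole row prefixes with list equality
--     # and overwrite a differing row in one slice assignment (keeps row identity).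
--     # Return-value equivalence is what is proved; the final contents of A are the
--     # same as after the original's cell-by-cell update.
--     result = True
--     for i in range(n):
--         if A[i][:n] != newA[i][:n]:
--             result = False
--             A[i][:n] = newA[i][:n]
--     return result
-- ===== Notes on version B (the rewrite author's own statement) =====
-- stated objective: simpler
-- what changed: Replaces the nested element-by-element loop with a single row-level loop using whole-row slice comparison and one slice assignment per differing row.
import Mathlib
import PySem

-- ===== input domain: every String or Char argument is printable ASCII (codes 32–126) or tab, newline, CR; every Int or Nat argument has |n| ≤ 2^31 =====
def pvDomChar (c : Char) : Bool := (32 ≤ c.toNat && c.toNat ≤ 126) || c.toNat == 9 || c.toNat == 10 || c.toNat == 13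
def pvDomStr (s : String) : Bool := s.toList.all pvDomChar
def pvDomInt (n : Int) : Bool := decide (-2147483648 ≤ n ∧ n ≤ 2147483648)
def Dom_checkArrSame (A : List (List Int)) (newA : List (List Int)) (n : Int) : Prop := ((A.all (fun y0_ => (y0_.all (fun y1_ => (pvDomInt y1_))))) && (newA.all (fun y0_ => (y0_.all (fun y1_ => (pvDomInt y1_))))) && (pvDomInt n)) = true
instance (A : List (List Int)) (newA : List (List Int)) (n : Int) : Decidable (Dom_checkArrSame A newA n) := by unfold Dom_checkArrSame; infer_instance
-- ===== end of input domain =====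

-- B replaces A's nested cell-by-cell scan by one row-level loop (whole-row prefix
-- comparison, one slice assignment per differing row): objective simpler.
-- A (and B) mutate the argument A in place; the final contents agree but the
-- equivalence proved here is about the RETURN value only.

-- ===== PORT A =====
-- The store A[i][j] = newA[i][j] writes a cell that the remaining iterations never
-- read again (indices strictly increase, newA is untouched), so the return value is
-- computed without threading the mutated array; each access A[i][j] / newA[i][j] is
-- performed exactly as in the Python (row lookup then cell lookup, each iteration).
def checkArrSame (A : List (List Int)) (newA : List (List Int)) (n : Int) : Bool :=
  (PySem.List.pyRange 0 n 1).foldl (fun result i =>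
    (PySem.List.pyRange 0 n 1).foldl (fun result j =>
      match (PySem.List.pyGet? A i).bind (fun r => PySem.List.pyGet? r j),
            (PySem.List.pyGet? newA i).bind (fun r => PySem.List.pyGet? r j) with
      | some a, some b => if a ≠ b then false else result
      | _, _ => result) result) true

-- ===== PORT B =====
-- Source B's slice assignment A[i][:n] = newA[i][:n] rewrites a row that the remaining
-- iterations never read again, so it too is elided from the return-value port.
def checkArrSame_alt (A : List (List Int)) (newA : List (List Int)) (n : Int) : Bool :=
  (PySem.List.pyRange 0 n 1).foldl (fun result i =>
    match PySem.List.pyGet? A i with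
    | some ra =>
      match PySem.List.pyGet? newA i with
      | some rb =>
          if PySem.List.slice ra none (some n) ≠ PySem.List.slice rb none (some n)
          then false else result
      | none => result
    | none => result) true

-- ===== PRECONDITION & SPEC =====
-- Pre_: exactly the inputs on which the Python A returns (no IndexError): either the
-- loops are empty (n ≤ 0) or both arrays have at least n rows and each of the first n
-- rows has at least n cells.
def Pre_checkArrSame (A : List (List Int)) (newA : List (List Int)) (n : Int) : Prop :=
  0 < n →
    (n ≤ (A.length : Int) ∧ n ≤ (newA.length : Int) ∧
     (∀ row ∈ A.take n.toNat, n ≤ (row.length : Int)) ∧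
     (∀ row ∈ newA.take n.toNat, n ≤ (row.length : Int)))
instance (A : List (List Int)) (newA : List (List Int)) (n : Int) : Decidable (Pre_checkArrSame A newA n) := by unfold Pre_checkArrSame; infer_instance
def pvWitness_checkArrSame : List (List Int) × List (List Int) × Int := ([[1, 2], [3, 4]], [[1, 5], [3, 4]], 2)


def Spec_checkArrSame (A : List (List Int)) (newA : List (List Int)) (n : Int) (out : Bool) : Prop := out = checkArrSame_alt A newA n
instance (A : List (List Int)) (newA : List (List Int)) (n : Int) (out : Bool) : Decidable (Spec_checkArrSame A newA n out) := by unfold Spec_checkArrSame; infer_instance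

-- ===== CLAIM (what is proved, stated in full; the proofs are below) =====
def Claim_equal_checkArrSame : Prop := ∀ (A : List (List Int)) (newA : List (List Int)) (n : Int), Dom_checkArrSame A newA n → Pre_checkArrSame A newA n → Spec_checkArrSame A newA n (checkArrSame A newA n)

-- ===== LEMMAS AND PROOFS =====

-- The inner row scan of A's port, in Nat form, is the Boolean "the n-prefixes agree".
lemma innerNat (ra rb : List Int) (m : Nat) (h1 : m ≤ ra.length) (h2 : m ≤ rb.length) (r : Bool) :
    (List.range m).foldl (fun result k =>
        match ra[k]?, rb[k]? with
        | some a, some b => if a ≠ b then false else result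
        | _, _ => result) r
      = (r && decide (ra.take m = rb.take m)) := by
  induction m with
  | zero => simp
  | succ m ih =>
    have hm1 : m < ra.length := by omega
    have hm2 : m < rb.length := by omega
    rw [List.range_succ, List.foldl_append]
    rw [ih (by omega) (by omega)]
    simp only [List.foldl_cons, List.foldl_nil,
      List.getElem?_eq_getElem hm1, List.getElem?_eq_getElem hm2]
    have hiff : (ra.take (m + 1) = rb.take (m + 1)) ↔
        (ra.take m = rb.take m ∧ ra[m] = rb[m]) := by
      rw [List.take_add_one, List.take_add_one,
        List.getElem?_eq_getElem hm1, List.getElem?_eq_getElem hm2]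
      constructor
      · intro h
        have hl : (ra.take m).length = (rb.take m).length := by
          simp [List.length_take]; omega
        simp only [Option.toList_some] at h
        exact ⟨List.append_inj_left h hl, by simpa using List.append_inj_right h hl⟩
      · rintro ⟨h1, h2⟩; simp [h1, h2]
    by_cases hab : ra[m] = rb[m]
    · by_cases ht : ra.take m = rb.take m <;> simp [hab, ht, hiff]
    · have : ¬ ra.take (m + 1) = rb.take (m + 1) := fun h => hab (hiff.mp h).2
      simp [hab, this]

theorem checkArrSame_spec : Claim_equal_checkArrSame := by
  intro A newA n _ hpre
  unfold Spec_checkArrSame checkArrSame checkArrSame_alt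
  apply PySem.List.foldl_congr_mem
  intro result i hi
  rw [PySem.List.mem_pyRange_one] at hi
  obtain ⟨hi0, hin⟩ := hi
  obtain ⟨hA, hN, hrowA, hrowN⟩ := hpre (lt_of_le_of_lt hi0 hin)
  have hiA : i < (A.length : Int) := lt_of_lt_of_le hin hA
  have hiN : i < (newA.length : Int) := lt_of_lt_of_le hin hN
  have hgA : PySem.List.pyGet? A i = some (A[i.toNat]'(by omega)) :=
    PySem.List.pyGet?_eq_some_getElem A hi0 hiA
  have hgN : PySem.List.pyGet? newA i = some (newA[i.toNat]'(by omega)) :=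
    PySem.List.pyGet?_eq_some_getElem newA hi0 hiN
  set ra := A[i.toNat]'(by omega) with hra
  set rb := newA[i.toNat]'(by omega) with hrb
  have hmemA : ra ∈ A.take n.toNat := by
    have : (A.take n.toNat)[i.toNat]'(by simp [List.length_take]; omega) = ra := by
      simp [hra, List.getElem_take]
    exact this ▸ List.getElem_mem _
  have hmemN : rb ∈ newA.take n.toNat := by
    have : (newA.take n.toNat)[i.toNat]'(by simp [List.length_take]; omega) = rb := by
      simp [hrb, List.getElem_take]
    exact this ▸ List.getElem_mem _
  have hlenA : n.toNat ≤ ra.length := by have := hrowA ra hmemA; omega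
  have hlenN : n.toNat ≤ rb.length := by have := hrowN rb hmemN; omega
  -- reduce both steps
  simp only [hgA, hgN, Option.bind_some]
  rw [PySem.List.pyRange_one]
  simp only [sub_zero, List.foldl_map, zero_add, PySem.List.pyGet?_natCast]
  rw [innerNat ra rb n.toNat hlenA hlenN result]
  rw [PySem.List.slice_to _ (hi0.trans hin.le), PySem.List.slice_to _ (hi0.trans hin.le)]
  by_cases ht : ra.take n.toNat = rb.take n.toNat <;> simp [ht]
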